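-- pv_equiv track=rewrite | github.com/antoine-agre/nurse_rostering | nurse_rostering/model/solution.py | _check_work_days_constraints
-- ===== SOURCE A (Python) =====
-- from typing import List, Union, Optional, Any
--
-- PersonnalSchedule = List[Optional[int]]
--
-- def _check_work_days_constraints(schedule: PersonnalSchedule, max_shifts: int, min_shifts: int, min_off_days: int) -> bool:
--     """Returns true if work days constraints are followed."""
--     s = schedule.copy()
--     while len(s) > 0:
--         length: int = 0
--         content: Any = s[0]
--         while len(s) > 0 and s[0] == content:
--             s.pop(0)
--             length += 1
--
--         if content == None: #off day
--             if length < min_off_days: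
--                 return False
--         elif content == -1: #work day
--             if length < min_shifts or length > max_shifts:
--                 return False
--     return True
-- ===== SOURCE B (Python) =====
-- def _check_work_days_constraints(schedule, max_shifts, min_shifts, min_off_days):
--     """Returns true if work days constraints are followed."""
--     def ok(v, length):
--         if v is None:  # off day
--             return length >= min_off_days
--         if v == -1:  # work day
--             return min_shifts <= length <= max_shifts
--         return True
--     cnt = 0
--     n = len(schedule)
--     for i, x in enumerate(schedule):
--         cnt += 1
--         if i + 1 == n or schedule[i + 1] != x:  # end of a run
--             if not ok(x, cnt):
--                 return False
--             cnt = 0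
--     return True
-- ===== Notes on version B (the rewrite author's own statement) =====
-- stated objective: faster
-- what changed: Replaces the pop(0)-based nested while loops (quadratic list shifting) with a single forward pass that counts the current run and checks it when the next element differs.
import Mathlib
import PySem

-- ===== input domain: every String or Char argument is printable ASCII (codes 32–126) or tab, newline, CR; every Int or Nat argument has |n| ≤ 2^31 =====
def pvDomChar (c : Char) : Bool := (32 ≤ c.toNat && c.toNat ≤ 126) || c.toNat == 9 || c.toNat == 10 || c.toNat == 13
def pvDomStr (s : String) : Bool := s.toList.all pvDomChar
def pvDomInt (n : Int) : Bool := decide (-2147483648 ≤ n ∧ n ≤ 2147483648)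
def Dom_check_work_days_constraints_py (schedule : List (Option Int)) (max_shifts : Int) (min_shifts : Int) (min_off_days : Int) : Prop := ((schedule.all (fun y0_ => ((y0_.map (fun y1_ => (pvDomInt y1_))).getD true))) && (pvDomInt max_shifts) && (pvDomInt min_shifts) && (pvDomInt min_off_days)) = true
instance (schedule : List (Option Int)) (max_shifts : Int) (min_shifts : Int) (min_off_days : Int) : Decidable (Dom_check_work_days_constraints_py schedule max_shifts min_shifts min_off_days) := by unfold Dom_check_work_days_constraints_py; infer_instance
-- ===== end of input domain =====

-- B replaces A's pop(0)-based nested while loops with a single forward pass counting the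
-- current run and checking it when the next element differs (objective: faster, O(n) vs O(n^2)).

-- ===== PORT A =====
-- A's outer while: take the maximal equal-run at the head (inner while popping/counting),
-- check it, continue on the rest.
def pvAGo (max_shifts min_shifts min_off_days : Int) : List (Option Int) → Bool
  | [] => true
  | x :: xs =>
    -- inner while: length counts pops of elements == content (head included)
    let length : Int := 1 + ((xs.takeWhile (fun z => z == x)).length : Int)
    let rest := xs.dropWhile (fun z => z == x)
    if x == none then
      if length < min_off_days then false else pvAGo max_shifts min_shifts min_off_days rest
    else if x == some (-1) then
      if length < min_shifts || max_shifts < length then false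
      else pvAGo max_shifts min_shifts min_off_days rest
    else pvAGo max_shifts min_shifts min_off_days rest
termination_by s => s.length
decreasing_by
  all_goals
    simp only [List.length_cons]
    exact Nat.lt_succ_of_le (List.length_dropWhile_le _ _)

def check_work_days_constraints_py (schedule : List (Option Int)) (max_shifts : Int) (min_shifts : Int) (min_off_days : Int) : Bool :=
  pvAGo max_shifts min_shifts min_off_days schedule

-- ===== PORT B =====
-- helper ok(v, length) of Source B
def pvOk (max_shifts min_shifts min_off_days : Int) (v : Option Int) (length : Int) : Bool :=
  if v == none then decide (length ≥ min_off_days)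
  else if v == some (-1) then decide (min_shifts ≤ length) && decide (length ≤ max_shifts)
  else true

-- Source B's single pass: cnt counts the current run; at a boundary (next differs or end) check ok.
def pvBGo (max_shifts min_shifts min_off_days : Int) : List (Option Int) → Int → Bool
  | [], _ => true
  | [x], cnt => pvOk max_shifts min_shifts min_off_days x (cnt + 1)
  | x :: y :: rest, cnt =>
    if y == x then pvBGo max_shifts min_shifts min_off_days (y :: rest) (cnt + 1)
    else pvOk max_shifts min_shifts min_off_days x (cnt + 1) &&
         pvBGo max_shifts min_shifts min_off_days (y :: rest) 0

def check_work_days_constraints_py_alt (schedule : List (Option Int)) (max_shifts : Int) (min_shifts : Int) (min_off_days : Int) : Bool :=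
  pvBGo max_shifts min_shifts min_off_days schedule 0

-- ===== PRECONDITION & SPEC =====
def Spec_check_work_days_constraints_py (schedule : List (Option Int)) (max_shifts : Int) (min_shifts : Int) (min_off_days : Int) (out : Bool) : Prop := out = check_work_days_constraints_py_alt schedule max_shifts min_shifts min_off_days
instance (schedule : List (Option Int)) (max_shifts : Int) (min_shifts : Int) (min_off_days : Int) (out : Bool) : Decidable (Spec_check_work_days_constraints_py schedule max_shifts min_shifts min_off_days out) := by unfold Spec_check_work_days_constraints_py; infer_instance

-- ===== CLAIM (what is proved, stated in full; the proofs are below) =====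
def Claim_equal_check_work_days_constraints_py : Prop := ∀ (schedule : List (Option Int)) (max_shifts : Int) (min_shifts : Int) (min_off_days : Int), Dom_check_work_days_constraints_py schedule max_shifts min_shifts min_off_days → Spec_check_work_days_constraints_py schedule max_shifts min_shifts min_off_days (check_work_days_constraints_py schedule max_shifts min_shifts min_off_days)

-- ===== LEMMAS AND PROOFS =====

-- A's head step, phrased through B's ok-check.
lemma pvAGo_step (ms mi mo : Int) (x : Option Int) (xs : List (Option Int)) :
    pvAGo ms mi mo (x :: xs) =
      (pvOk ms mi mo x (1 + ((xs.takeWhile (fun z => z == x)).length : Int)) &&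
        pvAGo ms mi mo (xs.dropWhile (fun z => z == x))) := by
  rw [pvAGo]
  unfold pvOk
  split_ifs <;> simp_all <;> omega

-- B with pending count cnt on x :: xs finishes x's run and then behaves as A on the rest.
lemma pvBGo_run (ms mi mo : Int) :
    ∀ (n : Nat) (xs : List (Option Int)), xs.length ≤ n → ∀ (x : Option Int) (cnt : Int),
    pvBGo ms mi mo (x :: xs) cnt =
      (pvOk ms mi mo x (cnt + 1 + ((xs.takeWhile (fun z => z == x)).length : Int)) &&
        pvAGo ms mi mo (xs.dropWhile (fun z => z == x))) := by
  intro n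
  induction n with
  | zero =>
    intro xs h x cnt
    have : xs = [] := List.eq_nil_of_length_eq_zero (Nat.le_zero.mp h)
    subst this
    simp [pvBGo, pvAGo]
  | succ n ih =>
    intro xs h x cnt
    match xs with
    | [] => simp [pvBGo, pvAGo]
    | y :: ys =>
      by_cases hyx : y = x
      · subst hyx
        rw [pvBGo]
        simp only [beq_self_eq_true, if_true]
        rw [ih ys (by simpa using Nat.lt_succ_iff.mp (Nat.lt_of_lt_of_le (Nat.lt_succ_self _) h)) y (cnt + 1)]
        simp only [List.takeWhile_cons, beq_self_eq_true, List.dropWhile_cons, if_true,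
          List.length_cons]
        congr 2
        push_cast
        ring
      · rw [pvBGo]
        have hne : (y == x) = false := beq_false_of_ne hyx
        simp only [hne, Bool.false_eq_true, if_false]
        rw [ih ys (by simpa using Nat.lt_succ_iff.mp (Nat.lt_of_lt_of_le (Nat.lt_succ_self _) h)) y 0]
        simp only [zero_add]
        rw [← pvAGo_step]
        simp [hne]

-- ===== VERDICT (by name: the statement is the Claim_ definition above) =====
theorem check_work_days_constraints_py_spec : Claim_equal_check_work_days_constraints_py := by
  intro schedule ms mi mo _
  unfold Spec_check_work_days_constraints_py check_work_days_constraints_py check_work_days_constraints_py_alt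
  match schedule with
  | [] => simp [pvAGo, pvBGo]
  | x :: xs =>
    rw [pvBGo_run ms mi mo xs.length xs le_rfl x 0, pvAGo_step]
    ring_nf
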